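-- pv_equiv track=rewrite | github.com/SungChanl/Base-Training | python/daily_Quiz/Day14_Quiz.py | solution
-- ===== SOURCE A (Python) =====
-- def solution(arr, queries):
--     answer = []
--     for i in range(len(arr)):
--         for s, e in queries:
--             if s <= i <= e:
--                 arr[i] += 1
--     answer = arr
--     return answer
-- ===== SOURCE B (Python) =====
-- def solution(arr, queries):
--     # Difference array + prefix sum: O(n + q) instead of A's O(n * q).
--     # Like A, mutates arr in place and returns it.
--     n = len(arr)
--     diff = [0] * (n + 1)
--     for s, e in queries:
--         lo = max(s, 0)
--         hi = min(e, n - 1)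
--         if lo <= hi:
--             diff[lo] += 1
--             diff[hi + 1] -= 1
--     run = 0
--     for i in range(n):
--         run += diff[i]
--         arr[i] += run
--     return arr
-- ===== Notes on version B (the rewrite author's own statement) =====
-- stated objective: faster
-- what changed: Replaces the per-index scan over all queries with a difference array (range increments clamped to [0,n-1]) finished by a single prefix-sum pass.
import Mathlib
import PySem

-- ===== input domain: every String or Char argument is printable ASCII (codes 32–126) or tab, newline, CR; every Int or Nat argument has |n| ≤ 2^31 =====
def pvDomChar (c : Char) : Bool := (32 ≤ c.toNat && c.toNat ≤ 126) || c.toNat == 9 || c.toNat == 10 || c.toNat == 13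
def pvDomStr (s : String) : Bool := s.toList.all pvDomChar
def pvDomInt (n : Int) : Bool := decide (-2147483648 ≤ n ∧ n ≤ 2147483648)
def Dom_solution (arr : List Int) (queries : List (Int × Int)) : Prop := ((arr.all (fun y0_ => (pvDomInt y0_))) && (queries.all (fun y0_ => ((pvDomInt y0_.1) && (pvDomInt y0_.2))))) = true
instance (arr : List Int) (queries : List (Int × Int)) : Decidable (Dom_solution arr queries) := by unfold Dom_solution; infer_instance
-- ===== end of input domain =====

-- B replaces A's per-index scan over all queries by a difference array with one prefix-sum pass (O(n+q) vs O(n*q)).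
-- Both A and the Python B mutate arr in place and return it; the theorems are about the return value.


-- ===== PORT A =====
-- literal port of A: for each index i, scan all queries; each covering query bumps arr[i]
def solution (arr : List Int) (queries : List (Int × Int)) : List Int :=
  let answer :=
    (List.range arr.length).foldl
      (fun (a : List Int) (i : Nat) =>
        queries.foldl
          (fun a q =>
            if q.1 ≤ (i : Int) ∧ (i : Int) ≤ q.2 then a.set i (a.getD i 0 + 1) else a)
          a)
      arr
  answer

-- ===== PORT B =====
-- one query's update of the difference array (clamped to [0, n-1])
def stepB (n : Nat) (d : List Int) (q : Int × Int) : List Int :=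
  let lo := max q.1 0
  let hi := min q.2 ((n : Int) - 1)
  if lo ≤ hi then
    let d1 := d.set lo.toNat (d.getD lo.toNat 0 + 1)
    d1.set (hi.toNat + 1) (d1.getD (hi.toNat + 1) 0 - 1)
  else d

-- the prefix-sum pass: run += diff[i]; arr[i] += run
def scanB : List Int → List Int → Nat → Int → List Int
  | [], _, _, _ => []
  | x :: rest, d, i, run =>
    let run' := run + d.getD i 0
    (x + run') :: scanB rest d (i + 1) run'

def solution_alt (arr : List Int) (queries : List (Int × Int)) : List Int :=
  let n := arr.length
  let diff := queries.foldl (stepB n) (List.replicate (n + 1) 0)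
  scanB arr diff 0 0

-- ===== PRECONDITION & SPEC =====
def Spec_solution (arr : List Int) (queries : List (Int × Int)) (out : List Int) : Prop := out = solution_alt arr queries
instance (arr : List Int) (queries : List (Int × Int)) (out : List Int) : Decidable (Spec_solution arr queries out) := by unfold Spec_solution; infer_instance

-- ===== CLAIM (what is proved, stated in full; the proofs are below) =====
def Claim_equal_solution : Prop := ∀ (arr : List Int) (queries : List (Int × Int)), Dom_solution arr queries → Spec_solution arr queries (solution arr queries)

-- ===== LEMMAS AND PROOFS =====

-- number of queries covering index i
def cntQ (qs : List (Int × Int)) (i : Nat) : Int :=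
  ((qs.filter (fun q => decide (q.1 ≤ (i : Int) ∧ (i : Int) ≤ q.2))).length : Int)

lemma set_getD_self (a : List Int) (i : Nat) : a.set i (a.getD i 0) = a := by
  induction a generalizing i with
  | nil => simp
  | cons x xs ih =>
    cases i with
    | zero => simp [List.getD]
    | succ j => simp [List.getD] at ih ⊢; exact ih j

lemma getD_set_self (a : List Int) (i : Nat) (v : Int) (h : i < a.length) :
    (a.set i v).getD i 0 = v := by
  simp [List.getD, h]

lemma inner_eq (i : Nat) (qs : List (Int × Int)) (a : List Int) :
    qs.foldl (fun a q => if q.1 ≤ (i : Int) ∧ (i : Int) ≤ q.2 then a.set i (a.getD i 0 + 1) else a) a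
      = a.set i (a.getD i 0 + cntQ qs i) := by
  induction qs generalizing a with
  | nil =>
    rw [List.foldl_nil, show cntQ [] i = 0 from rfl, add_zero, set_getD_self]
  | cons q qs ih =>
    by_cases hq : q.1 ≤ (i : Int) ∧ (i : Int) ≤ q.2
    · simp only [List.foldl_cons, if_pos hq, ih]
      by_cases h : i < a.length
      · rw [getD_set_self _ _ _ h, List.set_set]
        congr 1
        simp [cntQ, hq]
        ring
      · have hle : a.length ≤ i := Nat.le_of_not_lt h
        rw [List.set_eq_of_length_le hle, List.set_eq_of_length_le hle,
            List.set_eq_of_length_le hle]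
    · simp only [List.foldl_cons, if_neg hq, ih]
      congr 2
      simp [cntQ, hq]

lemma length_outer (l : List Nat) (arr : List Int) (qs : List (Int × Int)) :
    (l.foldl (fun a i => a.set i (a.getD i 0 + cntQ qs i)) arr).length = arr.length := by
  induction l generalizing arr with
  | nil => rfl
  | cons x xs ih => rw [List.foldl_cons, ih, List.length_set]

lemma outerA (qs : List (Int × Int)) (arr : List Int) (n j : Nat) :
    (((List.range n).foldl (fun a i => a.set i (a.getD i 0 + cntQ qs i)) arr))[j]? =
      if j < n then (arr[j]?).map (fun x => x + cntQ qs j) else arr[j]? := by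
  induction n with
  | zero => simp
  | succ n ih =>
    rw [List.range_succ, List.foldl_append, List.foldl_cons, List.foldl_nil]
    set F := (List.range n).foldl (fun a i => a.set i (a.getD i 0 + cntQ qs i)) arr with hF
    rcases Nat.lt_trichotomy j n with hj | hj | hj
    · rw [List.getElem?_set_ne (by omega), ih, if_pos hj, if_pos (by omega)]
    · subst hj
      by_cases hlen : j < F.length
      · rw [List.getElem?_set_self hlen, if_pos (by omega)]
        have hFj := ih
        rw [if_neg (by omega)] at hFj
        cases harr : arr[j]? with
        | none =>
          exfalso
          have h1 : F.length = arr.length := length_outer _ _ _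
          have h2 : arr.length ≤ j := List.getElem?_eq_none_iff.mp harr
          omega
        | some x => simp [List.getD, hFj, harr]
      · rw [List.set_eq_of_length_le (Nat.le_of_not_lt hlen), ih, if_neg (by omega),
            if_pos (by omega)]
        have : F[j]? = none := List.getElem?_eq_none (Nat.le_of_not_lt hlen)
        have hFj := ih
        rw [if_neg (by omega)] at hFj
        rw [hFj] at this
        simp [this]
    · rw [List.getElem?_set_ne (by omega), ih, if_neg (by omega), if_neg (by omega)]

-- partial sums of the difference array
def psumK (d : List Int) (i : Nat) : Int := ((List.range (i + 1)).map (fun t => d.getD t 0)).sum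

lemma sum_map_add_int (l : List Nat) (f g : Nat → Int) :
    (l.map (fun t => f t + g t)).sum = (l.map f).sum + (l.map g).sum := by
  induction l with
  | nil => simp
  | cons x xs ih => simp only [List.map_cons, List.sum_cons, ih]; ring


lemma sum_indicator (m k : Nat) (c : Int) :
    ((List.range m).map (fun t => if t = k then c else 0)).sum = if k < m then c else 0 := by
  induction m with
  | zero => simp
  | succ m ih =>
    rw [List.range_succ, List.map_append, List.sum_append, ih]
    by_cases h : k < m
    · rw [if_pos h, if_pos (by omega)]
      simp [show ¬ m = k by omega]
    · by_cases h2 : m = k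
      · subst h2; simp
      · rw [if_neg h, if_neg (by omega)]; simp [h2]

lemma psumK_set (d : List Int) (k : Nat) (c : Int) (i : Nat) (hk : k < d.length) :
    psumK (d.set k (d.getD k 0 + c)) i = psumK d i + (if k ≤ i then c else 0) := by
  unfold psumK
  have hpt : ∀ t, (d.set k (d.getD k 0 + c)).getD t 0 = d.getD t 0 + (if t = k then c else 0) := by
    intro t
    by_cases h : t = k
    · subst h; rw [getD_set_self _ _ _ hk]; simp
    · simp [List.getD, List.getElem?_set_ne (Ne.symm h), h]
  rw [List.map_congr_left (fun t _ => hpt t), sum_map_add_int, sum_indicator]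
  congr 1
  by_cases h : k ≤ i
  · rw [if_pos (by omega), if_pos h]
  · rw [if_neg (by omega), if_neg h]

lemma length_stepB (n : Nat) (d : List Int) (q : Int × Int) : (stepB n d q).length = d.length := by
  simp only [stepB]
  split <;> simp

lemma psumK_stepB (n : Nat) (d : List Int) (q : Int × Int) (i : Nat)
    (hd : d.length = n + 1) (hi : i < n) :
    psumK (stepB n d q) i =
      psumK d i + (if q.1 ≤ (i : Int) ∧ (i : Int) ≤ q.2 then 1 else 0) := by
  simp only [stepB]
  by_cases hle : max q.1 0 ≤ min q.2 ((n : Int) - 1)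
  · simp only [if_pos hle]
    have h0lo : (0 : Int) ≤ max q.1 0 := le_max_right _ _
    have hslo : q.1 ≤ max q.1 0 := le_max_left _ _
    have hhie : min q.2 ((n : Int) - 1) ≤ q.2 := min_le_left _ _
    have hhin : min q.2 ((n : Int) - 1) ≤ (n : Int) - 1 := min_le_right _ _
    have hlo' : ((max q.1 0).toNat : Int) = max q.1 0 := Int.toNat_of_nonneg h0lo
    have hhi' : ((min q.2 ((n : Int) - 1)).toNat : Int) = min q.2 ((n : Int) - 1) :=
      Int.toNat_of_nonneg (le_trans h0lo hle)
    have hmaxle : ∀ z : Int, max q.1 0 ≤ z ↔ (q.1 ≤ z ∧ 0 ≤ z) := fun z => max_le_iff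
    have hminle : ∀ z : Int, z ≤ min q.2 ((n : Int) - 1) ↔ (z ≤ q.2 ∧ z ≤ (n : Int) - 1) :=
      fun z => le_min_iff
    have hklo : (max q.1 0).toNat < d.length := by omega
    have hkhi : (min q.2 ((n : Int) - 1)).toNat + 1 < d.length := by omega
    have hkhi1 : (min q.2 ((n : Int) - 1)).toNat + 1 <
        (d.set (max q.1 0).toNat (d.getD (max q.1 0).toNat 0 + 1)).length := by
      simpa using hkhi
    have hsub : ∀ (l : List Int) (k : Nat), l.set k (l.getD k 0 - 1) = l.set k (l.getD k 0 + (-1)) := by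
      intro l k; rw [Int.sub_eq_add_neg]
    rw [hsub, psumK_set _ _ _ _ hkhi1, psumK_set _ _ _ _ hklo]
    have hiff : (q.1 ≤ (i : Int) ∧ (i : Int) ≤ q.2) ↔
        ((max q.1 0).toNat ≤ i ∧ i < (min q.2 ((n : Int) - 1)).toNat + 1) := by
      constructor
      · rintro ⟨h1, h2⟩
        have hA : max q.1 0 ≤ (i : Int) := (hmaxle _).mpr ⟨h1, by positivity⟩
        have hB : (i : Int) ≤ min q.2 ((n : Int) - 1) := (hminle _).mpr ⟨h2, by omega⟩
        omega
      · rintro ⟨h1, h2⟩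
        have hA : max q.1 0 ≤ (i : Int) := by omega
        have hB : (i : Int) ≤ min q.2 ((n : Int) - 1) := by omega
        exact ⟨le_trans hslo hA, le_trans hB hhie⟩
    by_cases hc : q.1 ≤ (i : Int) ∧ (i : Int) ≤ q.2
    · rw [if_pos hc]
      obtain ⟨h1, h2⟩ := hiff.mp hc
      rw [if_pos h1, if_neg (by omega)]
      ring
    · rw [if_neg hc]
      have := (not_iff_not.mpr hiff).mp hc
      by_cases h1 : (max q.1 0).toNat ≤ i
      · rw [if_pos h1, if_pos (by omega)]; ring
      · rw [if_neg h1, if_neg (by omega)]; ring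
  · simp only [if_neg hle]
    have hc : ¬ (q.1 ≤ (i : Int) ∧ (i : Int) ≤ q.2) := by
      rintro ⟨h1, h2⟩
      exact hle (le_trans ((max_le_iff).mpr ⟨h1, by positivity⟩)
        ((le_min_iff).mpr ⟨h2, by omega⟩))
    rw [if_neg hc, add_zero]

lemma psumK_diff (n : Nat) (qs : List (Int × Int)) (d0 : List Int) (i : Nat)
    (h0 : d0.length = n + 1) (hi : i < n) :
    psumK (qs.foldl (stepB n) d0) i = psumK d0 i + cntQ qs i := by
  induction qs generalizing d0 with
  | nil => simp [cntQ]
  | cons q qs ih =>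
    rw [List.foldl_cons, ih _ ((length_stepB n d0 q).trans h0),
        psumK_stepB n d0 q i h0 hi]
    simp only [cntQ]
    by_cases hc : q.1 ≤ (i : Int) ∧ (i : Int) ≤ q.2
    · simp [hc]; ring
    · simp [hc]

lemma psumK_replicate (n i : Nat) : psumK (List.replicate (n + 1) (0 : Int)) i = 0 := by
  unfold psumK
  have : ∀ t, (List.replicate (n + 1) (0 : Int)).getD t 0 = 0 := by
    intro t
    by_cases h : t < n + 1
    · simp [List.getD, h]
    · simp [List.getD, List.getElem?_eq_none (l := List.replicate (n + 1) (0 : Int)) (by simpa using Nat.le_of_not_lt h)]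
  rw [List.map_congr_left (fun t _ => this t)]
  simp

lemma scanB_getElem? (arr d : List Int) (k : Nat) (run : Int) (j : Nat) :
    (scanB arr d k run)[j]? =
      (arr[j]?).map (fun x => x + (run + ((List.range (j + 1)).map (fun t => d.getD (k + t) 0)).sum)) := by
  induction arr generalizing k run j with
  | nil => simp [scanB]
  | cons x rest ih =>
    cases j with
    | zero => simp [scanB]
    | succ j =>
      simp only [scanB, List.getElem?_cons_succ, ih]
      cases h : rest[j]? with
      | none => simp
      | some y =>
        simp only [Option.map_some]
        congr 1
        have hmap : List.map ((fun t => d.getD (k + t) 0) ∘ Nat.succ) (List.range (j + 1)) =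
            List.map (fun t => d.getD (k + 1 + t) 0) (List.range (j + 1)) := by
          apply List.map_congr_left
          intro t _
          simp only [Function.comp_apply, Nat.succ_eq_add_one]
          rw [show k + (t + 1) = k + 1 + t by omega]
        have hshift : ((List.range (j + 1 + 1)).map (fun t => d.getD (k + t) 0)).sum =
            d.getD k 0 + ((List.range (j + 1)).map (fun t => d.getD (k + 1 + t) 0)).sum := by
          rw [List.range_succ_eq_map, List.map_cons, List.sum_cons, List.map_map, hmap]
          simp
        rw [hshift]
        ring

lemma solution_eq_alt (arr : List Int) (queries : List (Int × Int)) :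
    solution arr queries = solution_alt arr queries := by
  apply List.ext_getElem?
  intro j
  -- left side
  have hfun : (fun (a : List Int) (i : Nat) =>
      queries.foldl
        (fun a q => if q.1 ≤ (i : Int) ∧ (i : Int) ≤ q.2 then a.set i (a.getD i 0 + 1) else a) a)
      = fun a i => a.set i (a.getD i 0 + cntQ queries i) := by
    funext a i
    exact inner_eq i queries a
  have hL : (solution arr queries)[j]? = (arr[j]?).map (fun x => x + cntQ queries j) := by
    show ((List.range arr.length).foldl _ arr)[j]? = _
    rw [hfun, outerA]
    by_cases hj : j < arr.length
    · rw [if_pos hj]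
    · rw [if_neg hj, List.getElem?_eq_none (Nat.le_of_not_lt hj)]
      simp
  rw [hL]
  -- right side
  show _ = (scanB arr (queries.foldl (stepB arr.length) (List.replicate (arr.length + 1) 0)) 0 0)[j]?
  rw [scanB_getElem?]
  by_cases hj : j < arr.length
  · have := psumK_diff arr.length queries (List.replicate (arr.length + 1) 0) j
      (by simp) hj
    rw [psumK_replicate, zero_add] at this
    unfold psumK at this
    simp only [zero_add]
    rw [this]
  · rw [List.getElem?_eq_none (Nat.le_of_not_lt hj)]
    simp

-- ===== VERDICT (by name: the statement is the Claim_ definition above) =====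
theorem solution_spec : Claim_equal_solution := by
  intro arr queries _
  unfold Spec_solution
  exact solution_eq_alt arr queries
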